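-- pv_equiv track=rewrite | github.com/vilonlab/posner_attention | Child-Run_long.py | consecutive_check
-- ===== SOURCE A (Python) =====
-- MAX_CONSECUTIVE_TRIALS = 3 # maximum number of consecutive trials of the same cue condition (valid, neutral)
--
-- def consecutive_check(trial_list):
--     """ Checks the trial list to ensure that there are no more than MAX_CONSECUTIVE_TRIALS consecutive trials with the same cue condition """
--     consecutive_count = 1
--     if len(trial_list) == 0:
--         return False
--     for i in range(1, len(trial_list)):
--         if trial_list[i]['cue_condition'] == trial_list[i - 1]['cue_condition']:
--             consecutive_count += 1
--             if consecutive_count > MAX_CONSECUTIVE_TRIALS: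
--                 return False  # Invalid trial list
--         else:
--             consecutive_count = 1
--     return True  # Valid trial list
-- ===== SOURCE B (Python) =====
-- MAX_CONSECUTIVE_TRIALS = 3
--
-- def consecutive_check(trial_list):
--     """Run-length encode the cue conditions, then check every run is short enough."""
--     conds = [t['cue_condition'] for t in trial_list]
--     runs = []  # list of [condition, run_length]
--     for c in conds:
--         if runs and runs[-1][0] == c:
--             runs[-1][1] += 1
--         else:
--             runs.append([c, 1])
--     return bool(runs) and all(n <= MAX_CONSECUTIVE_TRIALS for _, n in runs)
-- ===== Notes on version B (the rewrite author's own statement) =====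
-- stated objective: alternative
-- what changed: B replaces A's index loop with a running counter and early return by a run-length encoding of the cue conditions followed by a check that every run length is at most 3 (the empty case falls out of the RLE being empty).
-- outside the precondition, e.g. on consecutive_check([{}]): A returns True, B raises KeyError
import Mathlib
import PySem

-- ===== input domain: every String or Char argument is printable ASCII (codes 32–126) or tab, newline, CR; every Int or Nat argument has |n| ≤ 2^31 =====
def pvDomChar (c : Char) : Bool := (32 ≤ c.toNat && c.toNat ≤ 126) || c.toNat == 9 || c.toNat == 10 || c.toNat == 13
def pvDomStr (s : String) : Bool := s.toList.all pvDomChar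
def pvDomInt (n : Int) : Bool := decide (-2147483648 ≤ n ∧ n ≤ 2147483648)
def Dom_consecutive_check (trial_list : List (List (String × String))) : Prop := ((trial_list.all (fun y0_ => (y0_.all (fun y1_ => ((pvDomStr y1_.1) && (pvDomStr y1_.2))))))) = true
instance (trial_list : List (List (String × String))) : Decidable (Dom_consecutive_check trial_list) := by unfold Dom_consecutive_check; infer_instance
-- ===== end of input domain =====

-- B replaces A's index loop + running counter + early return by a run-length encoding of the
-- cue conditions followed by a check that every run length is ≤ 3 (objective: alternative).

-- trial['cue_condition'] (first match in the association list); Pre_ guarantees the key is present.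
def pvCond (t : List (String × String)) : String :=
  ((PySem.Dict.mk t).get? "cue_condition").getD ""

-- ===== PORT A =====
-- A's for-loop over i = 1 .. len-1 comparing trial i with trial i-1: structural recursion
-- carrying the previous cue condition and the running consecutive_count; early `return False`
-- becomes an immediate `false`.
def pvLoopA (prev : String) (count : Int) : List (List (String × String)) → Bool
  | [] => true
  | t :: ts =>
    if pvCond t == prev then
      if count + 1 > 3 then false
      else pvLoopA (pvCond t) (count + 1) ts
    else pvLoopA (pvCond t) 1 ts

def consecutive_check (trial_list : List (List (String × String))) : Bool :=
  match trial_list with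
  | [] => false
  | t :: ts => pvLoopA (pvCond t) 1 ts

-- ===== PORT B =====
-- Source B's RLE loop: runs[-1] is the head of a reversed accumulator.
def pvRleStep (runs : List (String × Int)) (c : String) : List (String × Int) :=
  match runs with
  | (c', n) :: rest => if c' == c then (c', n + 1) :: rest else (c, 1) :: (c', n) :: rest
  | [] => [(c, 1)]

def consecutive_check_alt (trial_list : List (List (String × String))) : Bool :=
  let conds := trial_list.map pvCond
  let runs := conds.foldl pvRleStep []
  !runs.isEmpty && runs.all (fun p => p.2 ≤ 3)

-- ===== PRECONDITION & SPEC =====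
-- Pre_ excludes trial lists with a trial missing the 'cue_condition' key: there B's list
-- comprehension raises KeyError, while A raises too except when it never reaches that trial
-- (a single-trial list, or an early False before it).
def Pre_consecutive_check (trial_list : List (List (String × String))) : Prop :=
  (trial_list.all fun t => ((PySem.Dict.mk t).get? "cue_condition").isSome) = true
instance (trial_list : List (List (String × String))) : Decidable (Pre_consecutive_check trial_list) := by unfold Pre_consecutive_check; infer_instance

def pvWitness_consecutive_check : (List (List (String × String))) :=
  [[("cue_condition", "valid")], [("cue_condition", "neutral")]]

def Spec_consecutive_check (trial_list : List (List (String × String))) (out : Bool) : Prop := out = consecutive_check_alt trial_list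
instance (trial_list : List (List (String × String))) (out : Bool) : Decidable (Spec_consecutive_check trial_list out) := by unfold Spec_consecutive_check; infer_instance

-- ===== CLAIM (what is proved, stated in full; the proofs are below) =====
def Claim_equal_consecutive_check : Prop := ∀ (trial_list : List (List (String × String))), Dom_consecutive_check trial_list → Pre_consecutive_check trial_list → Spec_consecutive_check trial_list (consecutive_check trial_list)

-- ===== LEMMAS AND PROOFS =====

-- once some run is too long, the RLE check can never become true again
theorem pvRle_bad {cs : List String} {acc : List (String × Int)}
    (h : ∃ p ∈ acc, ¬ p.2 ≤ 3) :
    (cs.foldl pvRleStep acc).all (fun p => p.2 ≤ 3) = false := by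
  induction cs generalizing acc with
  | nil =>
    obtain ⟨p, hp, hgt⟩ := h
    simp only [List.foldl_nil, List.all_eq_false]
    exact ⟨p, hp, by simpa using hgt⟩
  | cons c cs ih =>
    simp only [List.foldl_cons]
    apply ih
    obtain ⟨p, hp, hgt⟩ := h
    cases acc with
    | nil => simp at hp
    | cons q rest =>
      obtain ⟨c', n⟩ := q
      simp only [pvRleStep]
      split_ifs with hcc
      · rcases List.mem_cons.mp hp with h1 | h2
        · refine ⟨(c', n + 1), List.mem_cons_self, ?_⟩
          subst h1; simp at hgt ⊢; omega
        · exact ⟨p, List.mem_cons_of_mem _ h2, hgt⟩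
      · exact ⟨p, List.mem_cons_of_mem _ hp, hgt⟩

-- A's counter loop agrees with the RLE check, given the open run's count on top of the accumulator
theorem pvLoopA_rle (ts : List (List (String × String))) (prev : String) (count : Int)
    (acc : List (String × Int)) (hc : count ≤ 3) (ha : ∀ p ∈ acc, p.2 ≤ 3) :
    pvLoopA prev count ts
      = ((ts.map pvCond).foldl pvRleStep ((prev, count) :: acc)).all (fun p => p.2 ≤ 3) := by
  induction ts generalizing prev count acc with
  | nil =>
    simp only [pvLoopA, List.map_nil, List.foldl_nil, List.all_cons]
    symm
    simp only [Bool.and_eq_true, decide_eq_true_eq, List.all_eq_true]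
    exact ⟨hc, fun p hp => by simpa using ha p hp⟩
  | cons t ts ih =>
    simp only [pvLoopA, List.map_cons, List.foldl_cons, pvRleStep]
    by_cases he : pvCond t = prev
    · have h1 : (pvCond t == prev) = true := by simp [he]
      have h2 : (prev == pvCond t) = true := by simp [he]
      simp only [h1, h2, if_true]
      by_cases hgt : count + 1 > 3
      · rw [if_pos hgt]
        exact (pvRle_bad ⟨(prev, count + 1), List.mem_cons_self, by simp; omega⟩).symm
      · rw [if_neg hgt, he]
        exact ih prev (count + 1) acc (by omega) ha
    · have h1 : (pvCond t == prev) = false := by simp [he]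
      have h2 : (prev == pvCond t) = false := by
        simp only [beq_eq_false_iff_ne, ne_eq]
        exact fun hh => he hh.symm
      simp only [h1, h2, Bool.false_eq_true, if_false]
      refine ih (pvCond t) 1 ((prev, count) :: acc) (by omega) ?_
      intro p hp
      rcases List.mem_cons.mp hp with hh | hh
      · subst hh; simpa using hc
      · exact ha p hh

-- the RLE accumulator never becomes empty
theorem pvRle_ne_nil (cs : List String) (acc : List (String × Int)) (h : acc ≠ []) :
    cs.foldl pvRleStep acc ≠ [] := by
  induction cs generalizing acc with
  | nil => simpa using h
  | cons c cs ih =>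
    simp only [List.foldl_cons]
    apply ih
    cases acc with
    | nil => exact absurd rfl h
    | cons q rest =>
      obtain ⟨c', n⟩ := q
      simp only [pvRleStep]
      split_ifs <;> simp

-- ===== VERDICT (by name: the statement is the Claim_ definition above) =====
theorem consecutive_check_spec : Claim_equal_consecutive_check := by
  intro trial_list _ _
  unfold Spec_consecutive_check consecutive_check consecutive_check_alt
  match trial_list with
  | [] => simp
  | t :: ts =>
    simp only [List.map_cons, List.foldl_cons]
    have h1 : pvRleStep [] (pvCond t) = [(pvCond t, 1)] := rfl
    rw [h1]
    have hne := pvRle_ne_nil (ts.map pvCond) [(pvCond t, 1)] (by simp)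
    rw [pvLoopA_rle ts (pvCond t) 1 [] (by omega) (by simp)]
    simp [hne]
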